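-- pv_equiv track=rewrite | github.com/MrBrantCode/unitest_baseline | mut_generate/mist_train_cf/cf_101089/solution.py | uncommon_letter_frequency
-- ===== SOURCE A (Python) =====
-- def uncommon_letter_frequency(lst):
--     uncommon_letters = set()
--     freq = {}
--     for string in lst:
--         for c in set(string):
--             if all(string.count(c) == lst[i].count(c) for i in range(len(lst)) if c in lst[i]) and string.count(c) == 1:
--                 uncommon_letters.add(c)
--                 if c in freq:
--                     freq[c] += ord(c)
--                 else:
--                     freq[c] = ord(c)
--
--     return sorted(lst, key=lambda x: sum([freq[c] for c in set(x) if c in uncommon_letters]) or x)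
-- ===== SOURCE B (Python) =====
-- def uncommon_letter_frequency(lst):
--     # One pass: per-char max per-string count and number of containing strings;
--     # then a direct frequency table and a single keyed sort.
--     maxcnt = {}
--     containing = {}
--     for s in lst:
--         counts = {}
--         for ch in s:
--             counts[ch] = counts.get(ch, 0) + 1
--         for ch, n in counts.items():
--             if n > maxcnt.get(ch, 0):
--                 maxcnt[ch] = n
--             containing[ch] = containing.get(ch, 0) + 1
--     freq = {c: ord(c) * k for c, k in containing.items() if maxcnt[c] == 1}
--     return sorted(lst, key=lambda x: sum(freq.get(c, 0) for c in set(x)) or x)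
-- ===== Notes on version B (the rewrite author's own statement) =====
-- stated objective: faster
-- what changed: A rescans the entire list for every distinct character of every string (an all() over all strings plus repeated .count calls); B makes one pass over the list building per-character tables (max per-string count and number of containing strings), derives the frequency dict directly from them, and sorts with the same `sum(...) or x` key.
import Mathlib
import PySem

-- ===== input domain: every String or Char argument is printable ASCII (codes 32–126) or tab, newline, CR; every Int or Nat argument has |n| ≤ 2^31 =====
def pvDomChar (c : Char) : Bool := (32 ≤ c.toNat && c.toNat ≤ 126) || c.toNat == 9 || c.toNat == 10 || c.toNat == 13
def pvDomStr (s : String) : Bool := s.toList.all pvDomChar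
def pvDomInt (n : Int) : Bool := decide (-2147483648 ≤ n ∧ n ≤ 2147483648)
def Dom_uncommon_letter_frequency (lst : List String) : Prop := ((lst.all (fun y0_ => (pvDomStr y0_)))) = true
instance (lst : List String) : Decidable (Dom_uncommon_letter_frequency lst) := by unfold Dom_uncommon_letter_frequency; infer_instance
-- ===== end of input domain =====

-- B replaces A's per-character rescan of the whole list by one table-building pass plus direct lookups (faster algorithm).
-- Both ports encode Python's mixed `sum(...) or x` sort key as the pair (int key, string tie key); exact under
-- Pre_, which admits only inputs whose keys are homogeneous (Python raises TypeError on the others).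

-- ===== PORT A =====
-- ord(c)
def pvOrd (c : Char) : Int := (c.toNat : Int)

-- all(string.count(c) == lst[i].count(c) for i in range(len(lst)) if c in lst[i])
-- (single-character s.count(c) and `c in t` ported as code-point count/membership: exact)
def pvAllEq (lst : List String) (s : String) (c : Char) : Bool :=
  (PySem.List.pyRange 0 (PySem.List.len lst) 1).all (fun i =>
    if (PySem.List.pyGetD lst i "").toList.contains c then
      PySem.List.count s.toList c == PySem.List.count (PySem.List.pyGetD lst i "").toList c
    else true)

-- body of A's outer loop: `for c in set(string):` with the conditional updates
def pvStepA (lst : List String) (acc : PySem.Set Char × PySem.Dict Char Int) (s : String) :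
    PySem.Set Char × PySem.Dict Char Int :=
  (PySem.Set.ofList s.toList).foldl (fun acc c =>
    if pvAllEq lst s c && (PySem.List.count s.toList c == 1) then
      (PySem.Set.add acc.1 c,
       if acc.2.contains c then acc.2.insert c (acc.2.getD c 0 + pvOrd c)
       else acc.2.insert c (pvOrd c))
    else acc) acc

-- sum([freq[c] for c in set(x) if c in uncommon_letters]); freq[c] read as getD (the key is always present there)
def pvKeyA (unc : PySem.Set Char) (freq : PySem.Dict Char Int) (x : String) : Int :=
  (((PySem.Set.ofList x.toList).filter (fun c => unc.contains c)).map (fun c => freq.getD c 0)).sum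

def uncommon_letter_frequency (lst : List String) : List String :=
  let st := lst.foldl (pvStepA lst) (PySem.Set.empty, PySem.Dict.empty)
  PySem.List.sorted2 lst (fun x => pvKeyA st.1 st.2 x)
    (fun x => if pvKeyA st.1 st.2 x = 0 then x else "")

-- ===== PORT B =====
-- one string's contribution: per-string counts dict, folded into (maxcnt, containing)
def pvTabStep (acc : PySem.Dict Char Int × PySem.Dict Char Int) (s : String) :
    PySem.Dict Char Int × PySem.Dict Char Int :=
  let counts := s.toList.foldl (fun d ch => d.insert ch (d.getD ch 0 + 1)) PySem.Dict.empty
  counts.items.foldl (fun acc p =>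
    (if p.2 > acc.1.getD p.1 0 then acc.1.insert p.1 p.2 else acc.1,
     acc.2.insert p.1 (acc.2.getD p.1 0 + 1))) acc

-- freq = {c: ord(c) * k for c, k in containing.items() if maxcnt[c] == 1} (maxcnt[c] read as getD: key always present)
def pvFreqB (lst : List String) : PySem.Dict Char Int :=
  let t := lst.foldl pvTabStep (PySem.Dict.empty, PySem.Dict.empty)
  PySem.Dict.ofList ((t.2.items.filter (fun p => t.1.getD p.1 0 == 1)).map (fun p => (p.1, pvOrd p.1 * p.2)))

-- sum(freq.get(c, 0) for c in set(x))
def pvKeyB (freq : PySem.Dict Char Int) (x : String) : Int :=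
  ((PySem.Set.ofList x.toList).map (fun c => freq.getD c 0)).sum

def uncommon_letter_frequency_alt (lst : List String) : List String :=
  let freq := pvFreqB lst
  PySem.List.sorted2 lst (fun x => pvKeyB freq x) (fun x => if pvKeyB freq x = 0 then x else "")

-- ===== PRECONDITION & SPEC =====
-- a letter every string uses at most once
def pvUncommonB (lst : List String) (c : Char) : Bool := lst.all (fun s => decide (s.toList.count c ≤ 1))
-- this string's sort key is an int (its sum of uncommon-letter scores is nonzero)
def pvHasU (lst : List String) (x : String) : Bool := x.toList.any (fun c => pvUncommonB lst c)
-- Pre_ excludes exactly the inputs on which A (and B) raise TypeError: lists of length ≥ 2 whose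
-- `sum(...) or x` keys are mixed — some strings contain an uncommon letter (int key) and some do not (str key).
def Pre_uncommon_letter_frequency (lst : List String) : Prop :=
  lst.length ≤ 1 ∨ (lst.all (fun x => pvHasU lst x)) = true ∨ (lst.all (fun x => !pvHasU lst x)) = true
instance (lst : List String) : Decidable (Pre_uncommon_letter_frequency lst) := by
  unfold Pre_uncommon_letter_frequency; infer_instance
def pvWitness_uncommon_letter_frequency : List String := ["ab", "cd"]
def Spec_uncommon_letter_frequency (lst : List String) (out : List String) : Prop := out = uncommon_letter_frequency_alt lst
instance (lst : List String) (out : List String) : Decidable (Spec_uncommon_letter_frequency lst out) := by unfold Spec_uncommon_letter_frequency; infer_instance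

-- ===== CLAIM (what is proved, stated in full; the proofs are below) =====
def Claim_equal_uncommon_letter_frequency : Prop := ∀ (lst : List String), Dom_uncommon_letter_frequency lst → Pre_uncommon_letter_frequency lst → Spec_uncommon_letter_frequency lst (uncommon_letter_frequency lst)

-- ===== LEMMAS AND PROOFS =====
-- number of strings of l containing c
def pvNc (l : List String) (c : Char) : Nat := l.countP (fun s => s.toList.contains c)
-- the common per-character score both programs end up with
def pvF (lst : List String) (c : Char) : Int :=
  if pvUncommonB lst c && decide (0 < pvNc lst c) then pvOrd c * (pvNc lst c : Int) else 0
-- running maximum of per-string counts of c (B's maxcnt table)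
def pvMaxC (l : List String) (c : Char) : Int :=
  l.foldl (fun m s => if s.toList.contains c then max m ((s.toList.count c : Int)) else m) 0

-- A's test, for c actually occurring in s ∈ lst, is exactly "c is uncommon"
theorem pv_condA (lst : List String) (s : String) (c : Char) (hs : s ∈ lst) (hc : c ∈ s.toList) :
    (pvAllEq lst s c && (PySem.List.count s.toList c == 1)) = pvUncommonB lst c := by
  have hall : pvAllEq lst s c
      = lst.all (fun t => if t.toList.contains c then
          (PySem.List.count s.toList c == PySem.List.count t.toList c) else true) := by
    unfold pvAllEq
    rw [PySem.List.len_eq]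
    conv_rhs => rw [← PySem.List.map_pyGetD_pyRange_zero' lst ""]
    rw [List.all_map]
    rfl
  rw [hall]
  unfold pvUncommonB
  rw [Bool.eq_iff_iff]
  simp only [Bool.and_eq_true, List.all_eq_true, PySem.List.count_eq, beq_iff_eq,
    decide_eq_true_eq]
  constructor
  · rintro ⟨h1, h2⟩ t ht
    have h3 := h1 t ht
    by_cases hm : c ∈ t.toList
    · simp at h3
      rcases h3 with h3 | h3
      · exact absurd hm h3
      · omega
    · have : List.count c t.toList = 0 := List.count_eq_zero.2 hm
      omega
  · intro h
    have hs1 : List.count c s.toList = 1 :=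
      le_antisymm (h s hs) (List.count_pos_iff.2 hc)
    refine ⟨fun t ht => ?_, hs1⟩
    simp
    by_cases hm : c ∈ t.toList
    · exact Or.inr (le_antisymm (h s hs) (List.count_pos_iff.2 hc) |>.trans
        (le_antisymm (h t ht) (List.count_pos_iff.2 hm)).symm)
    · exact Or.inl hm

-- contains after Python set.add
theorem pv_contains_add (t : PySem.Set Char) (c0 d : Char) :
    (PySem.Set.add t c0).contains d = (d == c0 || t.contains d) := by
  rw [Bool.eq_iff_iff]
  simp only [PySem.Set.contains_iff, Bool.or_eq_true, beq_iff_eq, PySem.Set.mem_add]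
  tauto

-- effect of A's inner loop on the three observables
theorem pv_innerA (lst : List String) (s : String) (hs : s ∈ lst) :
    ∀ (cs : List Char), cs.Nodup → (∀ c ∈ cs, c ∈ s.toList) →
    ∀ (acc : PySem.Set Char × PySem.Dict Char Int), (∀ c, acc.2.contains c = acc.1.contains c) →
    ∀ c,
      ((cs.foldl (fun acc c =>
          if pvAllEq lst s c && (PySem.List.count s.toList c == 1) then
            (PySem.Set.add acc.1 c,
             if acc.2.contains c then acc.2.insert c (acc.2.getD c 0 + pvOrd c)
             else acc.2.insert c (pvOrd c))
          else acc) acc).1.contains c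
         = (acc.1.contains c || (cs.contains c && pvUncommonB lst c)))
      ∧ ((cs.foldl (fun acc c =>
          if pvAllEq lst s c && (PySem.List.count s.toList c == 1) then
            (PySem.Set.add acc.1 c,
             if acc.2.contains c then acc.2.insert c (acc.2.getD c 0 + pvOrd c)
             else acc.2.insert c (pvOrd c))
          else acc) acc).2.contains c
         = (cs.foldl (fun acc c =>
          if pvAllEq lst s c && (PySem.List.count s.toList c == 1) then
            (PySem.Set.add acc.1 c,
             if acc.2.contains c then acc.2.insert c (acc.2.getD c 0 + pvOrd c)
             else acc.2.insert c (pvOrd c))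
          else acc) acc).1.contains c)
      ∧ ((cs.foldl (fun acc c =>
          if pvAllEq lst s c && (PySem.List.count s.toList c == 1) then
            (PySem.Set.add acc.1 c,
             if acc.2.contains c then acc.2.insert c (acc.2.getD c 0 + pvOrd c)
             else acc.2.insert c (pvOrd c))
          else acc) acc).2.getD c 0
         = (if cs.contains c && pvUncommonB lst c then acc.2.getD c 0 + pvOrd c else acc.2.getD c 0)) := by
  intro cs
  induction cs with
  | nil =>
    intro _ _ acc hck c
    refine ⟨by simp, ?_, by simp⟩
    simpa using hck c
  | cons c0 cs ih =>
    intro hnd hsub acc hck c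
    have hc0s : c0 ∈ s.toList := hsub c0 (List.mem_cons_self ..)
    have hnd' := (List.nodup_cons.1 hnd).2
    have hc0cs : c0 ∉ cs := (List.nodup_cons.1 hnd).1
    simp only [List.foldl_cons]
    rw [pv_condA lst s c0 hs hc0s]
    cases hU : pvUncommonB lst c0 with
    | false =>
      simp only [Bool.false_eq_true, if_false]
      have IH := ih hnd' (fun c hc => hsub c (List.mem_cons_of_mem _ hc)) acc hck c
      refine ⟨?_, IH.2.1, ?_⟩
      · rw [IH.1]
        by_cases hcc : c = c0
        · rw [hcc]; simp [hU, hc0cs]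
        · simp [hcc]
      · rw [IH.2.2]
        by_cases hcc : c = c0
        · rw [hcc]; simp [hU, hc0cs]
        · simp [hcc]
    | true =>
      simp only [if_true]
      have hck1 : ∀ d, (if acc.2.contains c0 then acc.2.insert c0 (acc.2.getD c0 0 + pvOrd c0)
          else acc.2.insert c0 (pvOrd c0)).contains d
          = (PySem.Set.add acc.1 c0).contains d := by
        intro d
        have h2 : (if acc.2.contains c0 then acc.2.insert c0 (acc.2.getD c0 0 + pvOrd c0)
            else acc.2.insert c0 (pvOrd c0)).contains d = (d == c0 || acc.2.contains d) := by
          by_cases hb : acc.2.contains c0 = true <;>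
            simp [hb, PySem.Dict.contains_insert]
        rw [h2, pv_contains_add, hck d]
      have hgd1 : ∀ d, (if acc.2.contains c0 then acc.2.insert c0 (acc.2.getD c0 0 + pvOrd c0)
          else acc.2.insert c0 (pvOrd c0)).getD d 0
          = (if d = c0 then acc.2.getD c0 0 + pvOrd c0 else acc.2.getD d 0) := by
        intro d
        by_cases hb : acc.2.contains c0 = true
        · rw [if_pos hb, PySem.Dict.getD_insert]
        · rw [if_neg hb, PySem.Dict.getD_insert,
            PySem.Dict.getD_of_not_contains (k := c0) acc.2 0 (by simpa using hb)]
          simp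
      have IH := ih hnd' (fun c hc => hsub c (List.mem_cons_of_mem _ hc))
        (PySem.Set.add acc.1 c0,
         if acc.2.contains c0 then acc.2.insert c0 (acc.2.getD c0 0 + pvOrd c0)
         else acc.2.insert c0 (pvOrd c0)) hck1 c
      refine ⟨?_, IH.2.1, ?_⟩
      · rw [IH.1]
        dsimp only
        rw [pv_contains_add]
        by_cases hcc : c = c0
        · rw [hcc]; simp [hU, hc0cs]
        · have hbe : (c == c0) = false := by simpa using hcc
          simp [hcc, hbe]
      · rw [IH.2.2]
        dsimp only
        rw [hgd1]
        by_cases hcc : c = c0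
        · rw [hcc]; simp [hU, hc0cs]
        · simp [hcc]

-- membership in set(s) as a Bool
theorem pv_contains_ofList (xs : List Char) (c : Char) :
    List.contains (PySem.Set.ofList xs) c = decide (c ∈ xs) := by
  rw [Bool.eq_iff_iff]
  simp only [List.contains_iff_mem, PySem.Set.mem_ofList, decide_eq_true_eq]

-- A's accumulated state after any prefix l of lst
theorem pv_outerA (lst : List String) :
    ∀ (l : List String), (∀ s ∈ l, s ∈ lst) → ∀ c,
      ((l.foldl (pvStepA lst) (PySem.Set.empty, PySem.Dict.empty)).1.contains c
         = (pvUncommonB lst c && decide (0 < pvNc l c)))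
      ∧ ((l.foldl (pvStepA lst) (PySem.Set.empty, PySem.Dict.empty)).2.contains c
         = (l.foldl (pvStepA lst) (PySem.Set.empty, PySem.Dict.empty)).1.contains c)
      ∧ ((l.foldl (pvStepA lst) (PySem.Set.empty, PySem.Dict.empty)).2.getD c 0
         = (if pvUncommonB lst c then pvOrd c * (pvNc l c : Int) else 0)) := by
  intro l
  induction l using List.reverseRecOn with
  | nil =>
    intro _ c
    refine ⟨by simp [pvNc, PySem.Set.empty], ?_, by simp [pvNc, PySem.Dict.getD_empty]⟩
    simp [PySem.Set.empty, PySem.Dict.contains_empty]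
  | append_singleton l s ih =>
    intro hsub c
    have hsubl : ∀ t ∈ l, t ∈ lst := fun t ht => hsub t (List.mem_append_left _ ht)
    have hs : s ∈ lst := hsub s (List.mem_append_right _ (List.mem_singleton.2 rfl))
    have IH := ih hsubl
    have hck : ∀ c, (l.foldl (pvStepA lst) (PySem.Set.empty, PySem.Dict.empty)).2.contains c
        = (l.foldl (pvStepA lst) (PySem.Set.empty, PySem.Dict.empty)).1.contains c :=
      fun c => (IH c).2.1
    have hinner := pv_innerA lst s hs (PySem.Set.ofList s.toList) (PySem.Set.nodup_ofList _)
      (fun c hc => (PySem.Set.mem_ofList _ _).1 hc)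
      (l.foldl (pvStepA lst) (PySem.Set.empty, PySem.Dict.empty)) hck c
    rw [List.foldl_append]
    simp only [List.foldl_cons, List.foldl_nil]
    have hunf : pvStepA lst (l.foldl (pvStepA lst) (PySem.Set.empty, PySem.Dict.empty)) s
        = ((PySem.Set.ofList s.toList).foldl (fun acc c =>
            if pvAllEq lst s c && (PySem.List.count s.toList c == 1) then
              (PySem.Set.add acc.1 c,
               if acc.2.contains c then acc.2.insert c (acc.2.getD c 0 + pvOrd c)
               else acc.2.insert c (pvOrd c))
            else acc) (l.foldl (pvStepA lst) (PySem.Set.empty, PySem.Dict.empty))) := rfl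
    rw [hunf]
    obtain ⟨h1, h2, h3⟩ := hinner
    have hNapp : pvNc (l ++ [s]) c = pvNc l c + (if c ∈ s.toList then 1 else 0) := by
      by_cases hm : c ∈ s.toList <;>
        simp [pvNc, List.countP_append, hm]
    refine ⟨?_, ?_, ?_⟩
    · rw [h1, (IH c).1, pv_contains_ofList]
      by_cases hm : c ∈ s.toList <;> cases hU : pvUncommonB lst c <;>
        simp [hm, hNapp]
    · rw [h2]
    · rw [h3, (IH c).2.2, pv_contains_ofList]
      by_cases hm : c ∈ s.toList <;> cases hU : pvUncommonB lst c <;>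
        simp [hm, hNapp]
      ring
-- A's per-character contribution
theorem pv_A_char (lst : List String) (c : Char) :
    (if (lst.foldl (pvStepA lst) (PySem.Set.empty, PySem.Dict.empty)).1.contains c
     then (lst.foldl (pvStepA lst) (PySem.Set.empty, PySem.Dict.empty)).2.getD c 0 else 0) = pvF lst c := by
  obtain ⟨h1, h2, h3⟩ := pv_outerA lst lst (fun s hs => hs) c
  rw [h1, h3]
  unfold pvF
  by_cases hU : pvUncommonB lst c = true <;> by_cases hN : 0 < pvNc lst c <;>
    simp [hU, hN]

-- effect of B's inner items loop
theorem pv_innerB (s : String) :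
    ∀ (ks : List Char), ks.Nodup → ∀ (acc : PySem.Dict Char Int × PySem.Dict Char Int) (c : Char),
      (((ks.map (fun k => (k, (s.toList.count k : Int)))).foldl (fun acc p =>
          (if p.2 > acc.1.getD p.1 0 then acc.1.insert p.1 p.2 else acc.1,
           acc.2.insert p.1 (acc.2.getD p.1 0 + 1))) acc).1.getD c 0
        = (if ks.contains c then max (acc.1.getD c 0) ((s.toList.count c : Int)) else acc.1.getD c 0))
      ∧ (((ks.map (fun k => (k, (s.toList.count k : Int)))).foldl (fun acc p =>
          (if p.2 > acc.1.getD p.1 0 then acc.1.insert p.1 p.2 else acc.1,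
           acc.2.insert p.1 (acc.2.getD p.1 0 + 1))) acc).2.get? c
        = (if ks.contains c then some (acc.2.getD c 0 + 1) else acc.2.get? c)) := by
  intro ks
  induction ks with
  | nil => intro _ acc c; simp
  | cons k0 ks ih =>
    intro hnd acc c
    have hnd' := (List.nodup_cons.1 hnd).2
    have hk0 : k0 ∉ ks := (List.nodup_cons.1 hnd).1
    simp only [List.map_cons, List.foldl_cons]
    have f1 : ∀ d, (if (s.toList.count k0 : Int) > acc.1.getD k0 0
          then acc.1.insert k0 (s.toList.count k0 : Int) else acc.1).getD d 0
        = (if d = k0 then max (acc.1.getD k0 0) ((s.toList.count k0 : Int))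
           else acc.1.getD d 0) := by
      intro d
      by_cases hgt : (s.toList.count k0 : Int) > acc.1.getD k0 0
      · rw [if_pos hgt, PySem.Dict.getD_insert]
        by_cases hd : d = k0 <;> simp [hd, max_eq_right (le_of_lt hgt)]
      · rw [if_neg hgt]
        by_cases hd : d = k0 <;> simp [hd, max_eq_left (not_lt.1 hgt)]
    have IH := ih hnd'
      (if (s.toList.count k0 : Int) > acc.1.getD k0 0
         then acc.1.insert k0 (s.toList.count k0 : Int) else acc.1,
       acc.2.insert k0 (acc.2.getD k0 0 + 1)) c
    refine ⟨?_, ?_⟩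
    · rw [IH.1]
      dsimp only
      by_cases hc : c = k0
      · rw [hc]
        simp [(by simpa using hk0 : (k0 ∈ ks) = False), f1]
      · simp [hc, f1]
    · rw [IH.2]
      dsimp only
      by_cases hc : c = k0
      · rw [hc]
        simp [(by simpa using hk0 : (k0 ∈ ks) = False)]
      · simp [hc, PySem.Dict.get?_insert, PySem.Dict.getD_insert]

-- B's per-string loop: counts is Counter(s), its items a map over set(s)
theorem pv_tabstep_eq (s : String) (acc : PySem.Dict Char Int × PySem.Dict Char Int) :
    pvTabStep acc s
      = (((PySem.Set.ofList s.toList).map (fun k => (k, (s.toList.count k : Int)))).foldl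
          (fun acc p =>
            (if p.2 > acc.1.getD p.1 0 then acc.1.insert p.1 p.2 else acc.1,
             acc.2.insert p.1 (acc.2.getD p.1 0 + 1))) acc) := by
  unfold pvTabStep
  dsimp only
  rw [PySem.Dict.foldl_insert_getD_add_one_eq_counter, PySem.Dict.items_counter]

-- the containing-table component of B's inner loop is a plain dict fold
theorem pv_snd_fold (ps : List (Char × Int)) :
    ∀ acc : PySem.Dict Char Int × PySem.Dict Char Int,
      ((ps.foldl (fun acc p =>
          (if p.2 > acc.1.getD p.1 0 then acc.1.insert p.1 p.2 else acc.1,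
           acc.2.insert p.1 (acc.2.getD p.1 0 + 1))) acc).2)
        = ps.foldl (fun d p => d.insert p.1 (d.getD p.1 0 + 1)) acc.2 := by
  induction ps with
  | nil => intro acc; rfl
  | cons p ps ih =>
    intro acc
    simp only [List.foldl_cons]
    rw [ih]

-- B's tables after any prefix l
theorem pv_outerB :
    ∀ (l : List String) (c : Char),
      ((l.foldl pvTabStep (PySem.Dict.empty, PySem.Dict.empty)).1.getD c 0 = pvMaxC l c)
      ∧ ((l.foldl pvTabStep (PySem.Dict.empty, PySem.Dict.empty)).2.get? c
          = (if 0 < pvNc l c then some ((pvNc l c : Int)) else none)) := by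
  intro l
  induction l using List.reverseRecOn with
  | nil =>
    intro c
    constructor
    · simp [pvMaxC, PySem.Dict.getD_empty]
    · simp [pvNc, PySem.Dict.get?_empty]
  | append_singleton l s ih =>
    intro c
    rw [List.foldl_append]
    simp only [List.foldl_cons, List.foldl_nil]
    rw [pv_tabstep_eq]
    have hinner := pv_innerB s (PySem.Set.ofList s.toList) (PySem.Set.nodup_ofList _)
      (l.foldl pvTabStep (PySem.Dict.empty, PySem.Dict.empty)) c
    have hNapp : pvNc (l ++ [s]) c = pvNc l c + (if c ∈ s.toList then 1 else 0) := by
      by_cases hm : c ∈ s.toList <;>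
        simp [pvNc, List.countP_append, hm]
    have hMapp : pvMaxC (l ++ [s]) c
        = (if c ∈ s.toList then max (pvMaxC l c) ((s.toList.count c : Int)) else pvMaxC l c) := by
      unfold pvMaxC
      rw [List.foldl_append]
      simp only [List.foldl_cons, List.foldl_nil]
      by_cases hm : c ∈ s.toList <;> simp [hm]
    constructor
    · rw [hinner.1, pv_contains_ofList, (ih c).1, hMapp]
      by_cases hm : c ∈ s.toList <;> simp [hm]
    · rw [hinner.2, pv_contains_ofList,
        PySem.Dict.getD_eq_get?_getD, (ih c).2, hNapp]
      by_cases hm : c ∈ s.toList <;> by_cases hN : 0 < pvNc l c <;>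
        simp [hm, hN]
      omega

-- B's containing table has distinct keys
theorem pv_nodupT2 (l : List String) :
    ((l.foldl pvTabStep (PySem.Dict.empty, PySem.Dict.empty)).2.keys).Nodup := by
  induction l using List.reverseRecOn with
  | nil => exact PySem.Dict.nodup_keys_empty
  | append_singleton l s ih =>
    rw [List.foldl_append]
    simp only [List.foldl_cons, List.foldl_nil]
    rw [pv_tabstep_eq, pv_snd_fold]
    exact PySem.Dict.nodup_keys_foldl_insert_key _ Prod.fst _ _ ih

-- max of the per-string counts is 1 exactly when c is uncommon and occurs somewhere
theorem pv_maxc_facts (c : Char) :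
    ∀ l : List String, 0 ≤ pvMaxC l c
      ∧ ((pvMaxC l c ≤ 1) ↔ ∀ s ∈ l, s.toList.count c ≤ 1)
      ∧ ((0 < pvMaxC l c) ↔ 0 < pvNc l c) := by
  intro l
  induction l using List.reverseRecOn with
  | nil => simp [pvMaxC, pvNc]
  | append_singleton l s ih =>
    have hMapp : pvMaxC (l ++ [s]) c
        = (if c ∈ s.toList then max (pvMaxC l c) ((s.toList.count c : Int)) else pvMaxC l c) := by
      unfold pvMaxC
      rw [List.foldl_append]
      simp only [List.foldl_cons, List.foldl_nil]
      by_cases hm : c ∈ s.toList <;> simp [hm]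
    have hNapp : pvNc (l ++ [s]) c = pvNc l c + (if c ∈ s.toList then 1 else 0) := by
      by_cases hm : c ∈ s.toList <;>
        simp [pvNc, List.countP_append, hm]
    obtain ⟨h0, h1, h2⟩ := ih
    by_cases hm : c ∈ s.toList
    · have hcnt : 0 < s.toList.count c := List.count_pos_iff.2 hm
      rw [hMapp, if_pos hm, hNapp, if_pos hm]
      refine ⟨le_trans h0 (le_max_left _ _), ?_, ?_⟩
      · constructor
        · intro h t ht
          rcases List.mem_append.1 ht with h' | h'
          · exact h1.1 (le_trans (le_max_left _ _) h) t h'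
          · rw [List.mem_singleton.1 h']
            exact_mod_cast le_trans (le_max_right _ _) h
        · intro h
          have hM : pvMaxC l c ≤ 1 := h1.2 (fun t ht => h t (List.mem_append_left _ ht))
          have hC : (s.toList.count c : Int) ≤ 1 := by
            exact_mod_cast h s (List.mem_append_right _ (List.mem_singleton.2 rfl))
          exact max_le hM hC
      · constructor
        · intro _; omega
        · intro _
          exact lt_of_lt_of_le (by exact_mod_cast hcnt) (le_max_right _ _)
    · have hcnt : s.toList.count c = 0 := List.count_eq_zero.2 hm
      rw [hMapp, if_neg hm, hNapp, if_neg hm]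
      have hiff : (∀ t ∈ l ++ [s], t.toList.count c ≤ 1) ↔ (∀ t ∈ l, t.toList.count c ≤ 1) := by
        constructor
        · intro h t ht; exact h t (List.mem_append_left _ ht)
        · intro h t ht
          rcases List.mem_append.1 ht with h' | h'
          · exact h t h'
          · rw [List.mem_singleton.1 h']; omega
      refine ⟨h0, ?_, by simpa using h2⟩
      rw [hiff]
      exact h1

theorem pv_maxc_one_iff (l : List String) (c : Char) :
    pvMaxC l c = 1 ↔ (pvUncommonB l c = true ∧ 0 < pvNc l c) := by
  obtain ⟨h0, h1, h2⟩ := pv_maxc_facts c l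
  have hP : pvUncommonB l c = true ↔ ∀ s ∈ l, s.toList.count c ≤ 1 := by
    simp [pvUncommonB]
  constructor
  · intro h
    exact ⟨hP.2 (h1.1 (by omega)), h2.1 (by omega)⟩
  · rintro ⟨hp, hn⟩
    have ha := h1.2 (hP.1 hp)
    have hb := h2.2 hn
    omega

-- find? on a list with distinct keys returns the member with that key
theorem pv_find_key {ν : Type} (c : Char) :
    ∀ (ps : List (Char × ν)), ((ps.map Prod.fst).Nodup) → ∀ p ∈ ps, p.1 = c →
      ps.find? (fun q => q.1 == c) = some p := by
  intro ps
  induction ps with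
  | nil => intro _ p hp; simp at hp
  | cons q ps ih =>
    intro hnd p hp hpc
    have hnd0 : (q.1 :: ps.map Prod.fst).Nodup := by simpa using hnd
    have hnd1 : q.1 ∉ ps.map Prod.fst := (List.nodup_cons.1 hnd0).1
    have hnd' : (ps.map Prod.fst).Nodup := (List.nodup_cons.1 hnd0).2
    by_cases hq : q.1 = c
    · rw [List.find?_cons_of_pos (by simp [hq])]
      rcases List.mem_cons.1 hp with h | h
      · rw [h]
      · exfalso
        apply hnd1
        rw [hq, ← hpc]
        exact List.mem_map_of_mem h
    · rw [List.find?_cons_of_neg (by simp [hq])]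
      rcases List.mem_cons.1 hp with h | h
      · exact absurd (h ▸ hpc) hq
      · exact ih hnd' p h hpc

-- B's frequency table realises the same per-character score
theorem pv_B_char (lst : List String) (c : Char) :
    (pvFreqB lst).getD c 0 = pvF lst c := by
  have hnd2 := pv_nodupT2 lst
  have hkeys : (lst.foldl pvTabStep (PySem.Dict.empty, PySem.Dict.empty)).2.keys
      = (lst.foldl pvTabStep (PySem.Dict.empty, PySem.Dict.empty)).2.items.map Prod.fst := rfl
  have hndps : ((((lst.foldl pvTabStep (PySem.Dict.empty, PySem.Dict.empty)).2.items.filter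
        (fun p => (lst.foldl pvTabStep (PySem.Dict.empty, PySem.Dict.empty)).1.getD p.1 0 == 1)).map
        (fun p => (p.1, pvOrd p.1 * p.2))).map Prod.fst).Nodup := by
    rw [List.map_map]
    have hsub : (((lst.foldl pvTabStep (PySem.Dict.empty, PySem.Dict.empty)).2.items.filter
        (fun p => (lst.foldl pvTabStep (PySem.Dict.empty, PySem.Dict.empty)).1.getD p.1 0 == 1)).map
        (Prod.fst ∘ fun p => (p.1, pvOrd p.1 * p.2))).Sublist
        ((lst.foldl pvTabStep (PySem.Dict.empty, PySem.Dict.empty)).2.items.map Prod.fst) :=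
      List.Sublist.map _ (List.filter_sublist)
    exact (hkeys ▸ hnd2).sublist hsub
  have hitems : (pvFreqB lst).items
      = (((lst.foldl pvTabStep (PySem.Dict.empty, PySem.Dict.empty)).2.items.filter
          (fun p => (lst.foldl pvTabStep (PySem.Dict.empty, PySem.Dict.empty)).1.getD p.1 0 == 1)).map
          (fun p => (p.1, pvOrd p.1 * p.2))) := by
    unfold pvFreqB
    dsimp only
    show (PySem.Dict.empty.update _).items = _
    rw [PySem.Dict.update]
    rw [PySem.Dict.items_foldl_insert_fresh _ Prod.fst Prod.snd _
      (fun a _ => PySem.Dict.contains_empty (ν := Int) a.1) hndps]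
    simp [PySem.Dict.empty, Function.comp_def]
  have hget : (pvFreqB lst).get? c
      = ((((lst.foldl pvTabStep (PySem.Dict.empty, PySem.Dict.empty)).2.items.filter
          (fun p => (lst.foldl pvTabStep (PySem.Dict.empty, PySem.Dict.empty)).1.getD p.1 0 == 1)).map
          (fun p => (p.1, pvOrd p.1 * p.2))).find? (fun q => q.1 == c)).map Prod.snd := by
    rw [PySem.Dict.get?, hitems]
  rw [PySem.Dict.getD_eq_get?_getD, hget]
  by_cases hcase : pvUncommonB lst c = true ∧ 0 < pvNc lst c
  · have hg2 := (pv_outerB lst c).2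
    rw [if_pos hcase.2] at hg2
    have hmem2 := PySem.Dict.mem_items_of_get?_eq_some _ hg2
    have hQ : (lst.foldl pvTabStep (PySem.Dict.empty, PySem.Dict.empty)).1.getD c 0 = 1 := by
      rw [(pv_outerB lst c).1]
      exact (pv_maxc_one_iff lst c).2 hcase
    have hmemf : ((c : Char), ((pvNc lst c : Int))) ∈
        ((lst.foldl pvTabStep (PySem.Dict.empty, PySem.Dict.empty)).2.items.filter
          (fun p => (lst.foldl pvTabStep (PySem.Dict.empty, PySem.Dict.empty)).1.getD p.1 0 == 1)) :=
      List.mem_filter.2 ⟨hmem2, by simp [hQ]⟩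
    have hmemps := List.mem_map_of_mem (f := fun p => (p.1, pvOrd p.1 * p.2)) hmemf
    rw [pv_find_key c _ hndps _ hmemps rfl]
    unfold pvF
    rw [if_pos (by simp [hcase.1, hcase.2])]
    rfl
  · have hnone : ((((lst.foldl pvTabStep (PySem.Dict.empty, PySem.Dict.empty)).2.items.filter
        (fun p => (lst.foldl pvTabStep (PySem.Dict.empty, PySem.Dict.empty)).1.getD p.1 0 == 1)).map
        (fun p => (p.1, pvOrd p.1 * p.2))).find? (fun q => q.1 == c)) = none := by
      rw [List.find?_eq_none]
      rintro ⟨k, v⟩ hk hbeq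
      have hkc : k = c := by simpa using hbeq
      subst hkc
      obtain ⟨q, hqf, hqe⟩ := List.mem_map.1 hk
      obtain ⟨hqi, hqQ⟩ := List.mem_filter.1 hqf
      have hq1 : q.1 = k := congrArg Prod.fst hqe
      have hqpair : ((k : Char), q.2) ∈ (lst.foldl pvTabStep (PySem.Dict.empty, PySem.Dict.empty)).2.items := by
        have hqe2 : q = (k, q.2) := by
          cases q
          cases hq1
          rfl
        rw [← hqe2]
        exact hqi
      have hget2 : (lst.foldl pvTabStep (PySem.Dict.empty, PySem.Dict.empty)).2.get? k = some q.2 :=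
        (PySem.Dict.get?_eq_some_iff_mem_items _ k q.2 hnd2).2 hqpair
      have hg2 := (pv_outerB lst k).2
      by_cases hN : 0 < pvNc lst k
      · apply hcase
        refine ⟨?_, hN⟩
        have hQk : (lst.foldl pvTabStep (PySem.Dict.empty, PySem.Dict.empty)).1.getD q.1 0 = 1 := by
          simpa using hqQ
        rw [hq1, (pv_outerB lst k).1] at hQk
        exact ((pv_maxc_one_iff lst k).1 hQk).1
      · rw [if_neg hN] at hg2
        rw [hg2] at hget2
        simp at hget2
    rw [hnone]
    unfold pvF
    rw [if_neg (by intro hb; exact hcase (by simpa using hb))]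
    rfl

-- sum over a filtered list as a sum of guarded terms
theorem pv_sum_filter (l : List Char) (p : Char → Bool) (f : Char → Int) :
    ((l.filter p).map f).sum = (l.map (fun c => if p c then f c else 0)).sum := by
  induction l with
  | nil => rfl
  | cons a l ih =>
    by_cases h : p a = true <;> simp [h, ih]

-- the two sort keys agree on every string
theorem pv_key_eq (lst : List String) (x : String) :
    pvKeyA (lst.foldl (pvStepA lst) (PySem.Set.empty, PySem.Dict.empty)).1
           (lst.foldl (pvStepA lst) (PySem.Set.empty, PySem.Dict.empty)).2 x
      = pvKeyB (pvFreqB lst) x := by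
  unfold pvKeyA pvKeyB
  rw [pv_sum_filter]
  refine congrArg List.sum (List.map_congr_left ?_)
  intro c _
  rw [pv_B_char]
  exact pv_A_char lst c

-- ===== VERDICT (by name: the statement is the Claim_ definition above) =====
theorem uncommon_letter_frequency_spec : Claim_equal_uncommon_letter_frequency := by
  intro lst _ _
  show uncommon_letter_frequency lst = uncommon_letter_frequency_alt lst
  unfold uncommon_letter_frequency uncommon_letter_frequency_alt
  have hk : (fun x => pvKeyA (lst.foldl (pvStepA lst) (PySem.Set.empty, PySem.Dict.empty)).1
      (lst.foldl (pvStepA lst) (PySem.Set.empty, PySem.Dict.empty)).2 x)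
      = (fun x => pvKeyB (pvFreqB lst) x) := funext (pv_key_eq lst)
  simp only [hk]
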